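-- pv_equiv track=rewrite | github.com/BOM-Tool/MCP-SAFER | MCP-SCAN/scanner/analyzers/common/taint_engine.py | _propagate_recursive
-- ===== SOURCE A (Python) =====
-- from typing import Dict, Set, Any, List, Tuple, Optional
--
-- def _propagate_recursive(sources: Set[str], graph: Dict[str, Set[str]]) -> Set[str]:
--     tainted = set(sources)
--     worklist = list(sources)
--     visited = set(sources)
--
--     while worklist:
--         current = worklist.pop(0)
--
--         if current in graph:
--             for target in graph[current]:
--                 if target not in visited:
--                     visited.add(target)
--                     tainted.add(target)
--                     worklist.append(target)
--
--     return tainted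
-- ===== SOURCE B (Python) =====
-- def _propagate_recursive(sources, graph):
--     # Repeated-scan fixpoint instead of a BFS worklist: re-scan the current
--     # tainted set until a full pass adds nothing.
--     tainted = set(sources)
--     changed = True
--     while changed:
--         changed = False
--         for node in list(tainted):
--             if node in graph:
--                 for target in graph[node]:
--                     if target not in tainted:
--                         tainted.add(target)
--                         changed = True
--     return tainted
-- ===== Notes on version B (the rewrite author's own statement) =====
-- stated objective: alternative
-- what changed: Replaces the single-pass BFS worklist (queue popped with pop(0) + separate visited set) with a chaotic-iteration fixpoint: repeatedly re-scan a snapshot of the current tainted set, adding neighbours of each node, until a full pass changes nothing.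
import Mathlib
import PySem

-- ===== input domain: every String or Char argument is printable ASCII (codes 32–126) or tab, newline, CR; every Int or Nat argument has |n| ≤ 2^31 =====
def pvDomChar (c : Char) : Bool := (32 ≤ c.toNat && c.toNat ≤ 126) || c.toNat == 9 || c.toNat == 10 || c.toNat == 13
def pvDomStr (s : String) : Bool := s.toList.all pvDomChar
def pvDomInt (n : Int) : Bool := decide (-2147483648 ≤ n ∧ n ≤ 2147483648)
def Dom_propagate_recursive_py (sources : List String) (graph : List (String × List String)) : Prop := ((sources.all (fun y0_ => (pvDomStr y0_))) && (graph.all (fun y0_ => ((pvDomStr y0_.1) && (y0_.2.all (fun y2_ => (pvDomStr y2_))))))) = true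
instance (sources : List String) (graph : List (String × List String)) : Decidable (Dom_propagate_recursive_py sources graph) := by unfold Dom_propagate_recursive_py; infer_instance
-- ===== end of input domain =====

-- B replaces A's single-pass BFS worklist by a repeated-scan fixpoint over the tainted set
-- (objective: alternative decomposition; same return value, proved below).

-- ===== PORT A =====
-- termination measure for both loops: twice the number of distinct graph targets not yet
-- visited, plus (for A) the worklist length

def pvUnvis (g : List (String × List String)) (v : PySem.Set String) : Nat :=
  ((PySem.List.dedup (g.flatMap Prod.snd)).filter (fun x => !(PySem.Set.contains v x))).length

def pvAInner (nbrs : List String)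
    (st : PySem.Set String × List String × PySem.Set String) :
    PySem.Set String × List String × PySem.Set String :=
  nbrs.foldl (fun st tgt =>
    if !(PySem.Set.contains st.2.2 tgt) then
      (PySem.Set.add st.1 tgt, st.2.1 ++ [tgt], PySem.Set.add st.2.2 tgt)
    else st) st

theorem pvFilterLen_mono {α : Type} (l : List α) (p q : α → Bool)
    (h : ∀ x, q x = true → p x = true) :
    (l.filter q).length ≤ (l.filter p).length := by
  induction l with
  | nil => simp
  | cons a l ih =>
    by_cases hq : q a = true
    · simp [List.filter_cons, hq, h a hq]; omega
    · rw [Bool.not_eq_true] at hq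
      simp only [List.filter_cons, hq, cond_false]
      by_cases hp : p a = true
      · simp [hp]; omega
      · rw [Bool.not_eq_true] at hp; simp [hp]; omega

theorem pvFilterLen_lt {α : Type} [DecidableEq α] (l : List α) (p q : α → Bool) (x : α)
    (hn : l.Nodup) (hx : x ∈ l) (hpx : p x = true) (hqx : q x = false)
    (h : ∀ y, q y = true → p y = true) :
    (l.filter q).length < (l.filter p).length := by
  induction l with
  | nil => simp at hx
  | cons a l ih =>
    rcases List.nodup_cons.mp hn with ⟨ha, hn'⟩
    rcases List.mem_cons.mp hx with rfl | hx'
    · simp [List.filter_cons, hqx, hpx]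
      have := pvFilterLen_mono l p q h
      omega
    · have hlt := ih hn' hx'
      by_cases hq : q a = true
      · simp [List.filter_cons, hq, h a hq]; omega
      · rw [Bool.not_eq_true] at hq
        simp only [List.filter_cons, hq, cond_false]
        by_cases hp : p a = true
        · simp [hp]; omega
        · rw [Bool.not_eq_true] at hp; simp [hp]; omega

theorem pvContains_add_of (v : PySem.Set String) (x y : String)
    (h : PySem.Set.contains v y = true) : PySem.Set.contains (PySem.Set.add v x) y = true := by
  rw [PySem.Set.contains_iff] at *
  exact (PySem.Set.mem_add _ _ _).mpr (Or.inl h)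

theorem pvUnvis_add_lt (g : List (String × List String)) (v : PySem.Set String) (x : String)
    (hx : x ∈ g.flatMap Prod.snd) (hnx : x ∉ v) :
    pvUnvis g (PySem.Set.add v x) < pvUnvis g v := by
  apply pvFilterLen_lt _ _ _ x (PySem.List.nodup_dedup _) (by rw [PySem.List.mem_dedup]; exact hx)
  · simp only [Bool.not_eq_true']
    rw [Bool.eq_false_iff, Ne, PySem.Set.contains_iff]
    exact hnx
  · have : x ∈ PySem.Set.add v x := (PySem.Set.mem_add _ _ _).mpr (Or.inr rfl)
    rw [← PySem.Set.contains_iff] at this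
    simp [this]
  · intro y hy
    simp only [Bool.not_eq_true'] at hy ⊢
    by_contra hc
    rw [Bool.not_eq_false, PySem.Set.contains_iff] at hc
    have := pvContains_add_of v x y ((PySem.Set.contains_iff _ _).mpr hc)
    rw [this] at hy; exact absurd hy (by simp)

theorem pvNbrs_sub_flatMap (g : List (String × List String)) (u : String) (nbrs : List String)
    (h : PySem.Dict.get? (PySem.Dict.mk g) u = some nbrs) :
    ∀ x ∈ nbrs, x ∈ g.flatMap Prod.snd := by
  intro x hx
  induction g with
  | nil => simp [PySem.Dict.get?, PySem.Dict.empty] at h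
  | cons p g ih =>
    rw [show (PySem.Dict.mk (p :: g)) = PySem.Dict.mk ((p.1, p.2) :: g) from rfl,
      PySem.Dict.get?_mk_cons] at h
    simp only [List.flatMap_cons, List.mem_append]
    split at h
    · cases h; exact Or.inl hx
    · exact Or.inr (ih h)

theorem pvAInner_measure (g : List (String × List String)) (nbrs : List String)
    (hsub : ∀ x ∈ nbrs, x ∈ g.flatMap Prod.snd) :
    ∀ t w v, 2 * pvUnvis g (pvAInner nbrs (t, w, v)).2.2 + (pvAInner nbrs (t, w, v)).2.1.length
      ≤ 2 * pvUnvis g v + w.length := by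
  induction nbrs with
  | nil => intro t w v; simp [pvAInner]
  | cons tgt nbrs ih =>
    intro t w v
    have hsub' : ∀ x ∈ nbrs, x ∈ g.flatMap Prod.snd := fun x hx => hsub x (List.mem_cons_of_mem _ hx)
    by_cases hm : tgt ∈ v
    · have hc : PySem.Set.contains v tgt = true := (PySem.Set.contains_iff _ _).mpr hm
      simpa [pvAInner, List.foldl_cons, hc, hm] using ih hsub' t w v
    · have hc : PySem.Set.contains v tgt = false := by
        rw [Bool.eq_false_iff, Ne, PySem.Set.contains_iff]; exact hm
      have hlt := pvUnvis_add_lt g v tgt (hsub tgt (List.mem_cons_self)) hm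
      have hih := ih hsub' (PySem.Set.add t tgt) (w ++ [tgt]) (PySem.Set.add v tgt)
      simp only [pvAInner, List.foldl_cons, hc, hm] at hih ⊢
      simp only [List.length_append, List.length_cons, List.length_nil] at hih ⊢
      simp [pvAInner] at hih ⊢
      omega

def pvALoop (g : List (String × List String)) (t : PySem.Set String) (w : List String)
    (v : PySem.Set String) : PySem.Set String :=
  match w with
  | [] => t
  | current :: rest =>
    match hg : PySem.Dict.get? (PySem.Dict.mk g) current with
    | some nbrs =>
      let st := pvAInner nbrs (t, rest, v)
      pvALoop g st.1 st.2.1 st.2.2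
    | none => pvALoop g t rest v
termination_by 2 * pvUnvis g v + w.length
decreasing_by
  · have := pvAInner_measure g nbrs (pvNbrs_sub_flatMap g current nbrs hg) t rest v
    simp only [List.length_cons]; omega
  · simp only [List.length_cons]; omega

def propagate_recursive_py (sources : List String) (graph : List (String × List String)) :
    List String :=
  -- tainted = set(sources); worklist = list(sources); visited = set(sources)
  pvALoop graph (PySem.Set.ofList sources) sources (PySem.Set.ofList sources)

-- ===== PORT B =====

def pvBNode (g : List (String × List String)) (st : PySem.Set String × Bool) (node : String) :
    PySem.Set String × Bool :=
  match PySem.Dict.get? (PySem.Dict.mk g) node with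
  | some nbrs =>
    nbrs.foldl (fun st tgt =>
      if PySem.Set.contains st.1 tgt then st
      else (PySem.Set.add st.1 tgt, true)) st
  | none => st

def pvBPass (g : List (String × List String)) (snapshot : List String)
    (st : PySem.Set String × Bool) : PySem.Set String × Bool :=
  snapshot.foldl (fun st node =>
    match PySem.Dict.get? (PySem.Dict.mk g) node with
    | some nbrs =>
      nbrs.foldl (fun st tgt =>
        if PySem.Set.contains st.1 tgt then st
        else (PySem.Set.add st.1 tgt, true)) st
    | none => st) st

theorem pvBPass_eq_foldl_node (g : List (String × List String)) (snapshot : List String)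
    (st : PySem.Set String × Bool) :
    pvBPass g snapshot st = snapshot.foldl (pvBNode g) st := rfl

theorem pvBInnerFold_measure (g : List (String × List String)) (nbrs : List String)
    (hsub : ∀ x ∈ nbrs, x ∈ g.flatMap Prod.snd) :
    ∀ (st : PySem.Set String × Bool),
      pvUnvis g (nbrs.foldl (fun st tgt =>
          if PySem.Set.contains st.1 tgt then st
          else (PySem.Set.add st.1 tgt, true)) st).1 ≤ pvUnvis g st.1 ∧
      ((nbrs.foldl (fun st tgt =>
          if PySem.Set.contains st.1 tgt then st
          else (PySem.Set.add st.1 tgt, true)) st).2 = true →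
        st.2 = true ∨
        pvUnvis g (nbrs.foldl (fun st tgt =>
          if PySem.Set.contains st.1 tgt then st
          else (PySem.Set.add st.1 tgt, true)) st).1 < pvUnvis g st.1) := by
  induction nbrs with
  | nil => intro st; simp
  | cons tgt nbrs ih =>
    intro st
    have hsub' : ∀ x ∈ nbrs, x ∈ g.flatMap Prod.snd := fun x hx => hsub x (List.mem_cons_of_mem _ hx)
    by_cases hm : tgt ∈ st.1
    · have hc : PySem.Set.contains st.1 tgt = true := (PySem.Set.contains_iff _ _).mpr hm
      simpa [List.foldl_cons, hc, hm] using ih hsub' st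
    · have hc : PySem.Set.contains st.1 tgt = false := by
        rw [Bool.eq_false_iff, Ne, PySem.Set.contains_iff]; exact hm
      have hlt := pvUnvis_add_lt g st.1 tgt (hsub tgt (List.mem_cons_self)) hm
      have hih := ih hsub' (PySem.Set.add st.1 tgt, true)
      simp only [List.foldl_cons, hc, hm] at hih ⊢
      simp at hih ⊢
      constructor
      · omega
      · intro _; omega

theorem pvBNode_measure (g : List (String × List String)) (node : String)
    (st : PySem.Set String × Bool) :
    pvUnvis g (pvBNode g st node).1 ≤ pvUnvis g st.1 ∧
      ((pvBNode g st node).2 = true → st.2 = true ∨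
        pvUnvis g (pvBNode g st node).1 < pvUnvis g st.1) := by
  unfold pvBNode
  cases hg : PySem.Dict.get? (PySem.Dict.mk g) node with
  | none => simp
  | some nbrs => simpa using pvBInnerFold_measure g nbrs (pvNbrs_sub_flatMap g node nbrs hg) st

theorem pvBPass_measure (g : List (String × List String)) (snapshot : List String) :
    ∀ st, pvUnvis g (pvBPass g snapshot st).1 ≤ pvUnvis g st.1 ∧
      ((pvBPass g snapshot st).2 = true → st.2 = true ∨
        pvUnvis g (pvBPass g snapshot st).1 < pvUnvis g st.1) := by
  simp only [pvBPass_eq_foldl_node]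
  induction snapshot with
  | nil => intro st; simp
  | cons node snapshot ih =>
    intro st
    rcases pvBNode_measure g node st with ⟨h1le, h1im⟩
    rcases ih (pvBNode g st node) with ⟨h2le, h2im⟩
    simp only [List.foldl_cons] at *
    constructor
    · omega
    · intro hp
      rcases h2im hp with hb | hlt
      · rcases h1im hb with hb' | hlt'
        · exact Or.inl hb'
        · exact Or.inr (by omega)
      · exact Or.inr (by omega)

def pvBLoop (g : List (String × List String)) (t : PySem.Set String) : PySem.Set String :=
  let st := pvBPass g t (t, false)
  if h : st.2 = true then pvBLoop g st.1 else st.1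
termination_by pvUnvis g t
decreasing_by
  have := pvBPass_measure g t (t, false)
  rcases (this.2 h) with h' | h'
  · exact absurd h' (by simp)
  · exact h'

def propagate_recursive_py_alt (sources : List String) (graph : List (String × List String)) :
    List String :=
  -- tainted = set(sources); while changed: one pass over a snapshot of tainted
  pvBLoop graph (PySem.Set.ofList sources)

-- ===== PRECONDITION & SPEC =====
def Spec_propagate_recursive_py (sources : List String) (graph : List (String × List String)) (out : List String) : Prop := out = propagate_recursive_py_alt sources graph
instance (sources : List String) (graph : List (String × List String)) (out : List String) : Decidable (Spec_propagate_recursive_py sources graph out) := by unfold Spec_propagate_recursive_py; infer_instance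

-- ===== CLAIM (what is proved, stated in full; the proofs are below) =====
def Claim_equal_propagate_recursive_py : Prop := ∀ (sources : List String) (graph : List (String × List String)), Dom_propagate_recursive_py sources graph → Spec_propagate_recursive_py sources graph (propagate_recursive_py sources graph)

-- ===== LEMMAS AND PROOFS =====

def pvNbrs (g : List (String × List String)) (u : String) : List String :=
  (PySem.Dict.get? (PySem.Dict.mk g) u).getD []

def pvStepNode (g : List (String × List String)) (t : PySem.Set String) (u : String) :
    PySem.Set String × List String :=
  (pvNbrs g u).foldl (fun r tgt =>
    if !(PySem.Set.contains r.1 tgt) then (PySem.Set.add r.1 tgt, r.2 ++ [tgt])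
    else r) (t, [])

def pvSFold (st : PySem.Set String × List String) (nbrs : List String) :
    PySem.Set String × List String :=
  nbrs.foldl (fun r tgt =>
    if !(PySem.Set.contains r.1 tgt) then (PySem.Set.add r.1 tgt, r.2 ++ [tgt])
    else r) st

def pvStep (g : List (String × List String)) (t : PySem.Set String) :
    List String → PySem.Set String × List String
  | [] => (t, [])
  | u :: us =>
    let r1 := pvStepNode g t u
    let r2 := pvStep g r1.1 us
    (r2.1, r1.2 ++ r2.2)

def pvBFold (st : PySem.Set String × Bool) (nbrs : List String) :
    PySem.Set String × Bool :=
  nbrs.foldl (fun st tgt =>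
    if PySem.Set.contains st.1 tgt then st
    else (PySem.Set.add st.1 tgt, true)) st

theorem pvStepNode_eq_sfold (g : List (String × List String)) (t : PySem.Set String)
    (u : String) : pvStepNode g t u = pvSFold (t, []) (pvNbrs g u) := rfl

theorem pvBNode_eq_bfold (g : List (String × List String)) (st : PySem.Set String × Bool)
    (node : String) :
    pvBNode g st node = match PySem.Dict.get? (PySem.Dict.mk g) node with
      | some nbrs => pvBFold st nbrs
      | none => st := rfl

theorem pvSFold_cons (st : PySem.Set String × List String) (tgt : String) (nbrs : List String) :
    pvSFold st (tgt :: nbrs) =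
      pvSFold (if !(PySem.Set.contains st.1 tgt) then
        (PySem.Set.add st.1 tgt, st.2 ++ [tgt]) else st) nbrs := rfl

theorem pvBFold_cons (st : PySem.Set String × Bool) (tgt : String) (nbrs : List String) :
    pvBFold st (tgt :: nbrs) =
      pvBFold (if PySem.Set.contains st.1 tgt then st
        else (PySem.Set.add st.1 tgt, true)) nbrs := rfl

theorem pvContains_false_of_not_mem {t : PySem.Set String} {x : String} (hm : x ∉ t) :
    PySem.Set.contains t x = false := by
  rw [Bool.eq_false_iff, Ne, PySem.Set.contains_iff]; exact hm

theorem pvJointFold (nbrs : List String) :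
    ∀ (t : PySem.Set String) (n0 : List String) (c : Bool), ∃ d,
      pvSFold (t, n0) nbrs = (t ++ d, n0 ++ d) ∧
      pvBFold (t, c) nbrs = (t ++ d, c || !d.isEmpty) := by
  induction nbrs with
  | nil => intro t n0 c; exact ⟨[], by simp [pvSFold, pvBFold]⟩
  | cons tgt nbrs ih =>
    intro t n0 c
    by_cases hm : tgt ∈ t
    · have hc : PySem.Set.contains t tgt = true := (PySem.Set.contains_iff _ _).mpr hm
      obtain ⟨d, h1, h2⟩ := ih t n0 c
      refine ⟨d, ?_, ?_⟩
      · rw [pvSFold_cons]; rw [show (if !(PySem.Set.contains t tgt) then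
          (PySem.Set.add t tgt, n0 ++ [tgt]) else ((t : PySem.Set String), n0)) = ((t : PySem.Set String), n0) by rw [hc]; rfl]
        exact h1
      · rw [pvBFold_cons]; rw [show (if PySem.Set.contains t tgt then ((t : PySem.Set String), c)
          else (PySem.Set.add t tgt, true)) = ((t : PySem.Set String), c) by rw [hc]; rfl]
        exact h2
    · have hc : PySem.Set.contains t tgt = false := pvContains_false_of_not_mem hm
      have hadd : PySem.Set.add t tgt = t ++ [tgt] := PySem.Set.add_of_not_mem hm
      obtain ⟨d, h1, h2⟩ := ih (t ++ [tgt]) (n0 ++ [tgt]) true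
      refine ⟨tgt :: d, ?_, ?_⟩
      · rw [pvSFold_cons]; rw [show (if !(PySem.Set.contains t tgt) then
          (PySem.Set.add t tgt, n0 ++ [tgt]) else ((t : PySem.Set String), n0)) = (((t ++ [tgt] : List String) : PySem.Set String), n0 ++ [tgt]) by rw [hc, hadd]; rfl]
        rw [h1]; simp
      · rw [pvBFold_cons]; rw [show (if PySem.Set.contains t tgt then ((t : PySem.Set String), c)
          else (PySem.Set.add t tgt, true)) = (((t ++ [tgt] : List String) : PySem.Set String), true) by rw [hc, hadd]; rfl]
        rw [h2]; simp

theorem pvSFold_rep (nbrs : List String) (t : PySem.Set String) (n0 : List String) :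
    ∃ d, pvSFold (t, n0) nbrs = (t ++ d, n0 ++ d) := by
  obtain ⟨d, h1, _⟩ := pvJointFold nbrs t n0 false
  exact ⟨d, h1⟩

theorem pvJointNode (g : List (String × List String)) (u : String) (t : PySem.Set String)
    (c : Bool) : ∃ d,
    pvStepNode g t u = (t ++ d, d) ∧ pvBNode g (t, c) u = (t ++ d, c || !d.isEmpty) := by
  rw [pvBNode_eq_bfold, pvStepNode_eq_sfold]
  unfold pvNbrs
  cases hg : PySem.Dict.get? (PySem.Dict.mk g) u with
  | none => exact ⟨[], by simp [pvSFold]⟩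
  | some nbrs =>
    obtain ⟨d, h1, h2⟩ := pvJointFold nbrs t [] c
    exact ⟨d, by simpa using h1, h2⟩

theorem pvJoint (g : List (String × List String)) :
    ∀ (snap : List String) (t : PySem.Set String) (c : Bool), ∃ d,
      pvStep g t snap = (t ++ d, d) ∧
      pvBPass g snap (t, c) = (t ++ d, c || !d.isEmpty) := by
  intro snap
  induction snap with
  | nil => intro t c; exact ⟨[], by simp [pvStep, pvBPass]⟩
  | cons u snap ih =>
    intro t c
    obtain ⟨d1, hn1, hn2⟩ := pvJointNode g u t c
    obtain ⟨d2, hs1, hs2⟩ := ih (t ++ d1) (c || !d1.isEmpty)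
    refine ⟨d1 ++ d2, ?_, ?_⟩
    · show ((pvStep g (pvStepNode g t u).1 snap).1, (pvStepNode g t u).2 ++ (pvStep g (pvStepNode g t u).1 snap).2) = _
      rw [hn1]
      simp [hs1, List.append_assoc]
    · show pvBPass g snap (pvBNode g (t, c) u) = _
      rw [hn2, hs2]
      cases d1 <;> simp [Bool.or_assoc, List.append_assoc]

theorem pvSFold_mem (nbrs : List String) :
    ∀ (t : PySem.Set String) (n0 : List String) (x : String), x ∈ nbrs →
      x ∈ (pvSFold (t, n0) nbrs).1 := by
  induction nbrs with
  | nil => intro t n0 x hx; simp at hx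
  | cons tgt nbrs ih =>
    intro t n0 x hx
    by_cases hm : tgt ∈ t
    · have hc : PySem.Set.contains t tgt = true := (PySem.Set.contains_iff _ _).mpr hm
      rw [pvSFold_cons]
      rw [show (if !(PySem.Set.contains t tgt) then
          (PySem.Set.add t tgt, n0 ++ [tgt]) else ((t : PySem.Set String), n0)) = ((t : PySem.Set String), n0) by rw [hc]; rfl]
      rcases List.mem_cons.mp hx with rfl | hx'
      · obtain ⟨d, hd⟩ := pvSFold_rep nbrs t n0
        rw [hd]
        exact List.mem_append_left _ hm
      · exact ih t n0 x hx'
    · have hc : PySem.Set.contains t tgt = false := pvContains_false_of_not_mem hm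
      have hadd : PySem.Set.add t tgt = t ++ [tgt] := PySem.Set.add_of_not_mem hm
      rw [pvSFold_cons]
      rw [show (if !(PySem.Set.contains t tgt) then
          (PySem.Set.add t tgt, n0 ++ [tgt]) else ((t : PySem.Set String), n0)) = (((t ++ [tgt] : List String) : PySem.Set String), n0 ++ [tgt]) by rw [hc, hadd]; rfl]
      rcases List.mem_cons.mp hx with rfl | hx'
      · obtain ⟨d, hd⟩ := pvSFold_rep nbrs (t ++ [x]) (n0 ++ [x])
        rw [hd]
        exact List.mem_append_left _ (by simp)
      · exact ih (t ++ [tgt]) (n0 ++ [tgt]) x hx'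

theorem pvStepNode_mem (g : List (String × List String)) (t : PySem.Set String) (u x : String)
    (hx : x ∈ pvNbrs g u) : x ∈ (pvStepNode g t u).1 := by
  rw [pvStepNode_eq_sfold]
  exact pvSFold_mem (pvNbrs g u) t [] x hx

theorem pvStep_mono (g : List (String × List String)) (snap : List String)
    (t : PySem.Set String) (y : String) (hy : y ∈ t) : y ∈ (pvStep g t snap).1 := by
  obtain ⟨d, h, _⟩ := pvJoint g snap t false
  rw [h]
  exact List.mem_append_left _ hy

theorem pvStep_mem_nbrs (g : List (String × List String)) :
    ∀ (l : List String) (t : PySem.Set String) (u : String), u ∈ l →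
      ∀ x ∈ pvNbrs g u, x ∈ (pvStep g t l).1 := by
  intro l
  induction l with
  | nil => intro t u hu; simp at hu
  | cons u' us ih =>
    intro t u hu x hx
    show x ∈ (pvStep g (pvStepNode g t u').1 us).1
    rcases List.mem_cons.mp hu with rfl | hu'
    · exact pvStep_mono g us _ x (pvStepNode_mem g t u x hx)
    · exact ih _ u hu' x hx

theorem pvSFold_idle (nbrs : List String) :
    ∀ (t : PySem.Set String) (n0 : List String), (∀ x ∈ nbrs, x ∈ t) →
      pvSFold (t, n0) nbrs = (t, n0) := by
  induction nbrs with
  | nil => intro t n0 _; rfl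
  | cons tgt nbrs ih =>
    intro t n0 h
    have hc : PySem.Set.contains t tgt = true :=
      (PySem.Set.contains_iff _ _).mpr (h tgt (List.mem_cons_self))
    rw [pvSFold_cons]
    rw [show (if !(PySem.Set.contains t tgt) then
        (PySem.Set.add t tgt, n0 ++ [tgt]) else ((t : PySem.Set String), n0)) = ((t : PySem.Set String), n0) by rw [hc]; rfl]
    exact ih t n0 (fun x hx => h x (List.mem_cons_of_mem _ hx))

theorem pvStepNode_idle (g : List (String × List String)) (t : PySem.Set String) (u : String)
    (h : ∀ x ∈ pvNbrs g u, x ∈ t) : pvStepNode g t u = (t, []) := by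
  rw [pvStepNode_eq_sfold]
  exact pvSFold_idle (pvNbrs g u) t [] h

theorem pvStep_idle (g : List (String × List String)) :
    ∀ (p : List String) (t : PySem.Set String), (∀ u ∈ p, ∀ x ∈ pvNbrs g u, x ∈ t) →
      pvStep g t p = (t, []) := by
  intro p
  induction p with
  | nil => intro t _; rfl
  | cons u p ih =>
    intro t h
    have h1 : pvStepNode g t u = (t, []) := pvStepNode_idle g t u (h u (List.mem_cons_self))
    have h2 := ih t (fun u' hu' => h u' (List.mem_cons_of_mem _ hu'))
    show ((pvStep g (pvStepNode g t u).1 p).1, (pvStepNode g t u).2 ++ (pvStep g (pvStepNode g t u).1 p).2) = _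
    rw [h1]
    simp [h2]

theorem pvStep_append (g : List (String × List String)) :
    ∀ (p q : List String) (t : PySem.Set String),
      pvStep g t (p ++ q) =
        ((pvStep g (pvStep g t p).1 q).1, (pvStep g t p).2 ++ (pvStep g (pvStep g t p).1 q).2) := by
  intro p
  induction p with
  | nil => intro q t; simp [pvStep]
  | cons u p ih =>
    intro q t
    show ((pvStep g (pvStepNode g t u).1 (p ++ q)).1, (pvStepNode g t u).2 ++ (pvStep g (pvStepNode g t u).1 (p ++ q)).2) = _
    rw [ih q (pvStepNode g t u).1]
    show _ = ((pvStep g (pvStep g t (u :: p)).1 q).1, ((pvStepNode g t u).2 ++ (pvStep g (pvStepNode g t u).1 p).2) ++ _)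
    simp [pvStep, List.append_assoc]

theorem pvStepNodeFold_measure (g : List (String × List String)) (nbrs : List String)
    (hsub : ∀ x ∈ nbrs, x ∈ g.flatMap Prod.snd) :
    ∀ (st : PySem.Set String × List String),
      2 * pvUnvis g (nbrs.foldl (fun r tgt =>
          if !(PySem.Set.contains r.1 tgt) then (PySem.Set.add r.1 tgt, r.2 ++ [tgt])
          else r) st).1
        + (nbrs.foldl (fun r tgt =>
          if !(PySem.Set.contains r.1 tgt) then (PySem.Set.add r.1 tgt, r.2 ++ [tgt])
          else r) st).2.length
      ≤ 2 * pvUnvis g st.1 + st.2.length := by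
  induction nbrs with
  | nil => intro st; simp
  | cons tgt nbrs ih =>
    intro st
    have hsub' : ∀ x ∈ nbrs, x ∈ g.flatMap Prod.snd := fun x hx => hsub x (List.mem_cons_of_mem _ hx)
    by_cases hm : tgt ∈ st.1
    · have hc : PySem.Set.contains st.1 tgt = true := (PySem.Set.contains_iff _ _).mpr hm
      simpa [List.foldl_cons, hc, hm] using ih hsub' st
    · have hc : PySem.Set.contains st.1 tgt = false := by
        rw [Bool.eq_false_iff, Ne, PySem.Set.contains_iff]; exact hm
      have hlt := pvUnvis_add_lt g st.1 tgt (hsub tgt (List.mem_cons_self)) hm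
      have hih := ih hsub' (PySem.Set.add st.1 tgt, st.2 ++ [tgt])
      simp only [List.foldl_cons, hc, hm] at hih ⊢
      simp at hih ⊢
      omega

theorem pvStepNode_measure (g : List (String × List String)) (u : String) (t : PySem.Set String) :
    2 * pvUnvis g (pvStepNode g t u).1 + (pvStepNode g t u).2.length ≤ 2 * pvUnvis g t := by
  have hsub : ∀ x ∈ pvNbrs g u, x ∈ g.flatMap Prod.snd := by
    unfold pvNbrs
    cases hg : PySem.Dict.get? (PySem.Dict.mk g) u with
    | none => simp
    | some nbrs => simpa using pvNbrs_sub_flatMap g u nbrs hg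
  have := pvStepNodeFold_measure g (pvNbrs g u) hsub (t, [])
  simp only [List.length_nil] at this
  unfold pvStepNode
  omega

def pvBfs (g : List (String × List String)) (t : PySem.Set String) :
    List String → PySem.Set String
  | [] => t
  | u :: us =>
    let r := pvStepNode g t u
    pvBfs g r.1 (us ++ r.2)
termination_by w => 2 * pvUnvis g t + w.length
decreasing_by
  have := pvStepNode_measure g u t
  simp only [List.length_append, List.length_cons]
  omega

theorem pvBfs_nil (g : List (String × List String)) (t : PySem.Set String) :
    pvBfs g t [] = t := by
  rw [pvBfs.eq_def]

theorem pvBfs_cons (g : List (String × List String)) (t : PySem.Set String) (u : String)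
    (us : List String) :
    pvBfs g t (u :: us) = pvBfs g (pvStepNode g t u).1 (us ++ (pvStepNode g t u).2) := by
  rw [pvBfs.eq_def]

theorem pvAInner_eq_sfold (nbrs : List String) :
    ∀ (t : PySem.Set String) (w n0 : List String),
      pvAInner nbrs (t, w ++ n0, t) =
        ((pvSFold (t, n0) nbrs).1, w ++ (pvSFold (t, n0) nbrs).2, (pvSFold (t, n0) nbrs).1) := by
  induction nbrs with
  | nil => intro t w n0; simp [pvAInner, pvSFold]
  | cons tgt nbrs ih =>
    intro t w n0
    by_cases hm : tgt ∈ t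
    · have hc : PySem.Set.contains t tgt = true := (PySem.Set.contains_iff _ _).mpr hm
      rw [pvSFold_cons]
      rw [show (if !(PySem.Set.contains t tgt) then
          (PySem.Set.add t tgt, n0 ++ [tgt]) else ((t : PySem.Set String), n0)) = ((t : PySem.Set String), n0) by rw [hc]; rfl]
      rw [show pvAInner (tgt :: nbrs) (t, w ++ n0, t) = pvAInner nbrs (t, w ++ n0, t) by
        show pvAInner nbrs (if !(PySem.Set.contains t tgt) then _ else (t, w ++ n0, t)) = _
        rw [hc]; rfl]
      exact ih t w n0
    · have hc : PySem.Set.contains t tgt = false := pvContains_false_of_not_mem hm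
      have hadd : PySem.Set.add t tgt = t ++ [tgt] := PySem.Set.add_of_not_mem hm
      rw [pvSFold_cons]
      rw [show (if !(PySem.Set.contains t tgt) then
          (PySem.Set.add t tgt, n0 ++ [tgt]) else ((t : PySem.Set String), n0)) = (((t ++ [tgt] : List String) : PySem.Set String), n0 ++ [tgt]) by rw [hc, hadd]; rfl]
      rw [show pvAInner (tgt :: nbrs) (t, w ++ n0, t) =
          pvAInner nbrs (((t ++ [tgt] : List String) : PySem.Set String), w ++ (n0 ++ [tgt]), ((t ++ [tgt] : List String) : PySem.Set String)) by
        show pvAInner nbrs (if !(PySem.Set.contains t tgt) then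
          (PySem.Set.add t tgt, (w ++ n0) ++ [tgt], PySem.Set.add t tgt) else (t, w ++ n0, t)) = _
        rw [hc, hadd]; simp [List.append_assoc]]
      exact ih (t ++ [tgt]) w (n0 ++ [tgt])

theorem pvALoop_eq_bfs (g : List (String × List String)) :
    ∀ (t : PySem.Set String) (w : List String) (v : PySem.Set String), v = t →
      pvALoop g t w v = pvBfs g t w := by
  intro t w v
  induction t, w, v using pvALoop.induct g with
  | case1 t1 v1 => intro h; subst h; rw [pvALoop.eq_def]; dsimp only; rw [pvBfs_nil]
  | case2 t1 v1 u us nbrs hg st ih =>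
    intro h
    subst h
    have hst : st = ((pvStepNode g v1 u).1, us ++ (pvStepNode g v1 u).2,
        (pvStepNode g v1 u).1) := by
      show pvAInner nbrs (v1, us, v1) = _
      rw [pvStepNode_eq_sfold]
      unfold pvNbrs
      rw [hg]
      simpa using pvAInner_eq_sfold nbrs v1 us []
    have hih := ih
    rw [hst] at hih
    rw [pvALoop.eq_def]
    dsimp only
    split
    next nbrs2 hg2 =>
      rw [hg] at hg2
      injection hg2 with h2
      subst h2
      rw [pvBfs_cons]
      show pvALoop g st.1 st.2.1 st.2.2 = _
      rw [hst]
      exact hih rfl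
    next hg2 =>
      rw [hg] at hg2
      simp at hg2
  | case3 t1 v1 u us hg ih =>
    intro h
    subst h
    have hn : pvStepNode g v1 u = (v1, []) := by
      rw [pvStepNode_eq_sfold]
      unfold pvNbrs
      rw [hg]
      rfl
    rw [pvALoop.eq_def]
    dsimp only
    split
    next nbrs2 hg2 =>
      rw [hg] at hg2
      simp at hg2
    next hg2 =>
      rw [ih rfl, pvBfs_cons, hn]
      simp

theorem pvStep_cons (g : List (String × List String)) (t : PySem.Set String) (u : String)
    (us : List String) :
    pvStep g t (u :: us) = ((pvStep g (pvStepNode g t u).1 us).1,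
      (pvStepNode g t u).2 ++ (pvStep g (pvStepNode g t u).1 us).2) := rfl

theorem pvBfs_split (g : List (String × List String)) :
    ∀ (l acc : List String) (t : PySem.Set String),
      pvBfs g t (l ++ acc) = pvBfs g (pvStep g t l).1 (acc ++ (pvStep g t l).2) := by
  intro l
  induction l with
  | nil => intro acc t; simp [pvStep]
  | cons u us ih =>
    intro acc t
    rw [List.cons_append, pvBfs_cons]
    rw [show (us ++ acc) ++ (pvStepNode g t u).2 = us ++ (acc ++ (pvStepNode g t u).2) from
      List.append_assoc _ _ _]
    rw [ih (acc ++ (pvStepNode g t u).2) (pvStepNode g t u).1]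
    rw [pvStep_cons]
    simp [List.append_assoc]

theorem pvBfs_frontier (g : List (String × List String)) (t : PySem.Set String)
    (w : List String) :
    pvBfs g t w = pvBfs g (pvStep g t w).1 (pvStep g t w).2 := by
  have := pvBfs_split g w [] t
  simpa using this

-- first-occurrence de-duplication relative to a list of already-seen nodes

def pvDed (seen : List String) : List String → List String
  | [] => []
  | u :: l => if u ∈ seen then pvDed seen l else u :: pvDed (u :: seen) l

theorem pvDed_congr : ∀ (l s1 s2 : List String), (∀ x, x ∈ s1 ↔ x ∈ s2) →
    pvDed s1 l = pvDed s2 l := by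
  intro l
  induction l with
  | nil => intro s1 s2 _; rfl
  | cons u l ih =>
    intro s1 s2 h
    simp only [pvDed]
    by_cases hm : u ∈ s1
    · rw [if_pos hm, if_pos ((h u).mp hm)]
      exact ih s1 s2 h
    · rw [if_neg hm, if_neg (fun hc => hm ((h u).mpr hc))]
      rw [ih (u :: s1) (u :: s2) (by intro x; simp [h x])]

theorem pvFoldlAdd_eq_ded : ∀ (l : List String) (s : PySem.Set String),
    List.foldl PySem.Set.add s l = s ++ pvDed s l := by
  intro l
  induction l with
  | nil => intro s; simp [pvDed]
  | cons u l ih =>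
    intro s
    simp only [List.foldl_cons, pvDed]
    by_cases hm : u ∈ s
    · rw [if_pos hm, PySem.Set.add_of_mem hm]
      exact ih s
    · rw [if_neg hm, PySem.Set.add_of_not_mem hm, ih (s ++ [u])]
      rw [pvDed_congr l (s ++ [u]) (u :: s) (by intro x; simp; tauto)]
      simp

theorem pvOfList_eq_ded (l : List String) : PySem.Set.ofList l = pvDed [] l := by
  rw [PySem.Set.ofList_eq_foldl, pvFoldlAdd_eq_ded]
  simp

theorem pvStep_ded (g : List (String × List String)) :
    ∀ (l : List String) (t : PySem.Set String) (seen : List String),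
      (∀ u ∈ seen, ∀ x ∈ pvNbrs g u, x ∈ t) →
      pvStep g t l = pvStep g t (pvDed seen l) := by
  intro l
  induction l with
  | nil => intro t seen _; rfl
  | cons u l ih =>
    intro t seen h
    simp only [pvDed]
    by_cases hm : u ∈ seen
    · rw [if_pos hm]
      have hn : pvStepNode g t u = (t, []) := pvStepNode_idle g t u (h u hm)
      rw [pvStep_cons, hn]
      simp only [List.nil_append]
      rw [← ih t seen h]
    · rw [if_neg hm]
      rw [pvStep_cons, pvStep_cons]
      have hih := ih (pvStepNode g t u).1 (u :: seen) (by
        intro u' hu' x hx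
        rcases List.mem_cons.mp hu' with rfl | hu''
        · exact pvStepNode_mem g t u' x hx
        · obtain ⟨d, hd⟩ := pvSFold_rep (pvNbrs g u) t []
          rw [pvStepNode_eq_sfold, hd]
          exact List.mem_append_left _ (h u' hu'' x hx))
      rw [hih]

theorem pvIsEmpty_false_of_ne {d : List String} (h : d ≠ []) : d.isEmpty = false := by
  cases d with
  | nil => exact absurd rfl h
  | cons a l => rfl

theorem pvMain (g : List (String × List String)) :
    ∀ (t : PySem.Set String) (p f : List String), t = p ++ f →
      (∀ u ∈ p, ∀ x ∈ pvNbrs g u, x ∈ t) →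
      pvBfs g t f = pvBLoop g t := by
  intro t
  induction t using pvBLoop.induct g with
  | case1 t st hc ihm =>
    intro p f hpf h
    obtain ⟨D, hD1, hD2⟩ := pvJoint g t t false
    have hD2' : pvBPass g t (t, false) = (t ++ D, !D.isEmpty) := by simpa using hD2
    have hst : st = (t ++ D, !D.isEmpty) := hD2'
    rw [hst] at hc ihm
    have hD_ne : D ≠ [] := by
      intro hD
      subst hD
      exact absurd hc (by simp)
    have hidle : pvStep g t p = (t, []) := pvStep_idle g p t h
    have hsplit := pvStep_append g p f t
    rw [← hpf, hidle] at hsplit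
    simp only [List.nil_append] at hsplit
    have hstepf : pvStep g t f = (t ++ D, D) := hsplit.symm.trans hD1
    have hIH := ihm (p ++ f) D (by show t ++ D = (p ++ f) ++ D; rw [hpf]) (by
      intro u hu x hx
      show x ∈ t ++ D
      rcases List.mem_append.mp hu with hup | huf
      · exact List.mem_append_left _ (h u hup x hx)
      · have := pvStep_mem_nbrs g f t u huf x hx
        rw [hstepf] at this
        exact this)
    rw [pvBfs_frontier g t f, hstepf]
    show pvBfs g (t ++ D) D = pvBLoop g t
    rw [pvBLoop.eq_def]
    dsimp only
    rw [hD2']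
    have hcond : ((t ++ D, !D.isEmpty) : PySem.Set String × Bool).2 = true := by
      simp [pvIsEmpty_false_of_ne hD_ne]
    rw [dif_pos hcond]
    exact hIH
  | case2 t st hc =>
    intro p f hpf h
    obtain ⟨D, hD1, hD2⟩ := pvJoint g t t false
    have hD2' : pvBPass g t (t, false) = (t ++ D, !D.isEmpty) := by simpa using hD2
    have hst : st = (t ++ D, !D.isEmpty) := hD2'
    rw [hst] at hc
    have hD_nil : D = [] := by
      by_contra hne
      exact hc (by simp [pvIsEmpty_false_of_ne hne])
    subst hD_nil
    have hidle : pvStep g t p = (t, []) := pvStep_idle g p t h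
    have hsplit := pvStep_append g p f t
    rw [← hpf, hidle] at hsplit
    simp only [List.nil_append] at hsplit
    have hstepf : pvStep g t f = (t, []) := hsplit.symm.trans (by simpa using hD1)
    rw [pvBfs_frontier g t f, hstepf]
    show pvBfs g t [] = pvBLoop g t
    rw [pvBfs_nil, pvBLoop.eq_def]
    dsimp only
    rw [hD2']
    have hcond : ¬ (((t ++ [], !([] : List String).isEmpty) : PySem.Set String × Bool).2 = true) := by
      simp
    rw [dif_neg hcond]
    simp

-- ===== VERDICT (by name: the statement is the Claim_ definition above) =====
theorem propagate_recursive_py_spec : Claim_equal_propagate_recursive_py := by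
  unfold Claim_equal_propagate_recursive_py
  intro sources graph _
  unfold Spec_propagate_recursive_py propagate_recursive_py propagate_recursive_py_alt
  have h1 : pvALoop graph (PySem.Set.ofList sources) sources (PySem.Set.ofList sources) =
      pvBfs graph (PySem.Set.ofList sources) sources :=
    pvALoop_eq_bfs graph (PySem.Set.ofList sources) sources (PySem.Set.ofList sources) rfl
  have hded : pvStep graph (PySem.Set.ofList sources) sources =
      pvStep graph (PySem.Set.ofList sources) (PySem.Set.ofList sources) := by
    rw [pvStep_ded graph sources (PySem.Set.ofList sources) [] (by simp)]
    rw [← pvOfList_eq_ded]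
  have h2 : pvBfs graph (PySem.Set.ofList sources) sources =
      pvBfs graph (PySem.Set.ofList sources) (PySem.Set.ofList sources) := by
    rw [pvBfs_frontier graph (PySem.Set.ofList sources) sources, hded,
      ← pvBfs_frontier graph (PySem.Set.ofList sources) (PySem.Set.ofList sources)]
  have h3 : pvBfs graph (PySem.Set.ofList sources) (PySem.Set.ofList sources) =
      pvBLoop graph (PySem.Set.ofList sources) :=
    pvMain graph (PySem.Set.ofList sources) [] (PySem.Set.ofList sources) rfl (by simp)
  rw [h1, h2, h3]
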